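-- pv_equiv track=rewrite | github.com/zeyadElshazly1/Analyist-pro | apps/api/app/services/ingestion/sniffer.py | _find_blank_blocks
-- ===== SOURCE A (Python) =====
-- def _find_blank_blocks(lines: list[str]) -> list[tuple[int, int]]:
--     """Return list of (start, end) index ranges for consecutive blank lines."""
--     blocks: list[tuple[int, int]] = []
--     start = None
--     for i, line in enumerate(lines):
--         if not line.strip():
--             if start is None:
--                 start = i
--         else:
--             if start is not None:
--                 blocks.append((start, i - 1))
--                 start = None
--     if start is not None:
--         blocks.append((start, len(lines) - 1))
--     return blocks
-- ===== SOURCE B (Python) =====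
-- def _find_blank_blocks(lines: list[str]) -> list[tuple[int, int]]:
--     """Return list of (start, end) index ranges for consecutive blank lines.
--
--     Run-grouping: jump over each maximal run of blank lines at once instead of
--     maintaining a start-sentinel state machine with a trailing flush."""
--     n = len(lines)
--     blocks = []
--     i = 0
--     while i < n:
--         if lines[i].strip():
--             i += 1
--             continue
--         j = i + 1
--         while j < n and not lines[j].strip():
--             j += 1
--         blocks.append((i, j - 1))
--         i = j
--     return blocks
-- ===== Notes on version B (the rewrite author's own statement) =====
-- stated objective: simpler
-- what changed: B replaces A's start-sentinel state machine with its post-loop flush by a run-grouping scan that consumes each maximal blank run in one step and emits its (start,end) immediately.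
import Mathlib
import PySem

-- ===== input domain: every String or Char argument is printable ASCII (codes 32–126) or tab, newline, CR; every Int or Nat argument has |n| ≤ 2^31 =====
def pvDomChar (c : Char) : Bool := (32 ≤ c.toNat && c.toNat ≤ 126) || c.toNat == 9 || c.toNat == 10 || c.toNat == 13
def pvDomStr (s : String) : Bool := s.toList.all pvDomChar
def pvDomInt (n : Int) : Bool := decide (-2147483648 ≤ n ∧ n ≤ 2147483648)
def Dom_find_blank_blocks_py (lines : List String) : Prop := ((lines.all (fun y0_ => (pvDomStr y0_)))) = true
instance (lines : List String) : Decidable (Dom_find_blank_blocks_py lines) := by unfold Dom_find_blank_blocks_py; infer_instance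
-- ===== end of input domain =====

-- B replaces A's start-sentinel state machine (with post-loop flush) by a run-grouping scan
-- that consumes each maximal blank run in one step; objective: simpler.

-- `not line.strip()`: true iff the stripped line is empty
def pvBlank (l : String) : Bool := PySem.Str.strip l == ""

-- ===== PORT A =====
-- the for-loop: state = (start, blocks), i tracks enumerate
def aLoop : List String → Int → Option Int → List (Int × Int) → Option Int × List (Int × Int)
  | [], _, start, blocks => (start, blocks)
  | l :: rest, i, start, blocks =>
    if pvBlank l then
      match start with
      | none => aLoop rest (i + 1) (some i) blocks
      | some _ => aLoop rest (i + 1) start blocks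
    else
      match start with
      | some s => aLoop rest (i + 1) none (blocks ++ [(s, i - 1)])
      | none => aLoop rest (i + 1) none blocks

-- the trailing `if start is not None` flush; iend = len(lines)
def aFinish (r : Option Int × List (Int × Int)) (iend : Int) : List (Int × Int) :=
  match r.1 with
  | some s => r.2 ++ [(s, iend - 1)]
  | none => r.2

def find_blank_blocks_py (lines : List String) : List (Int × Int) :=
  aFinish (aLoop lines 0 none []) (lines.length : Int)

-- ===== PORT B =====
-- outer while-loop = structural recursion; inner while-loop scanning the blank run = takeWhile count
def bGo : List String → Int → List (Int × Int)
  | [], _ => []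
  | l :: rest, i =>
    if pvBlank l then
      let k : Nat := 1 + (rest.takeWhile pvBlank).length
      (i, i + (k : Int) - 1) :: bGo (rest.drop (k - 1)) (i + (k : Int))
    else bGo rest (i + 1)
  termination_by rest _ => rest.length
  decreasing_by
  · simp only [List.length_drop, List.length_cons]; omega
  · simp only [List.length_cons]; omega

def find_blank_blocks_py_alt (lines : List String) : List (Int × Int) :=
  bGo lines 0

-- ===== PRECONDITION & SPEC =====
def Spec_find_blank_blocks_py (lines : List String) (out : List (Int × Int)) : Prop := out = find_blank_blocks_py_alt lines
instance (lines : List String) (out : List (Int × Int)) : Decidable (Spec_find_blank_blocks_py lines out) := by unfold Spec_find_blank_blocks_py; infer_instance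

-- ===== CLAIM (what is proved, stated in full; the proofs are below) =====
def Claim_equal_find_blank_blocks_py : Prop := ∀ (lines : List String), Dom_find_blank_blocks_py lines → Spec_find_blank_blocks_py lines (find_blank_blocks_py lines)

-- ===== LEMMAS AND PROOFS =====

theorem dropWhile_eq_drop_len {α : Type} (p : α → Bool) (xs : List α) :
    xs.dropWhile p = xs.drop (xs.takeWhile p).length := by
  induction xs with
  | nil => rfl
  | cons x xs ih =>
    by_cases h : p x = true
    · simp [h, ih]
    · simp [h]

-- combined invariant: L1 (state = none) and L2 (state = some s) simultaneously
theorem aLoop_invariant (n : Nat) : ∀ (lines : List String), lines.length = n →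
    (∀ (i : Int) (acc : List (Int × Int)),
      aFinish (aLoop lines i none acc) (i + lines.length) = acc ++ bGo lines i) ∧
    (∀ (i s : Int) (acc : List (Int × Int)),
      aFinish (aLoop lines i (some s) acc) (i + lines.length) =
        acc ++ (s, i + ((lines.takeWhile pvBlank).length : Int) - 1) ::
          bGo (lines.dropWhile pvBlank) (i + ((lines.takeWhile pvBlank).length : Int))) := by
  induction n using Nat.strong_induction_on with
  | _ n ih =>
    intro lines hlen
    cases lines with
    | nil =>
      constructor
      · intro i acc; simp [aLoop, aFinish, bGo]
      · intro i s acc; simp [aLoop, aFinish, bGo]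
    | cons l rest =>
      have hrest : rest.length < n := by simp at hlen; omega
      obtain ⟨ih1, ih2⟩ := ih rest.length hrest rest rfl
      constructor
      · intro i acc
        by_cases hb : pvBlank l = true
        · -- blank, start becomes some i; use L2 on rest
          simp only [aLoop, hb, if_true, List.length_cons]
          push_cast
          rw [show i + ((rest.length : Int) + 1) = (i + 1) + (rest.length : Int) by ring,
            ih2 (i + 1) i acc]
          simp only [bGo, hb, if_true]
          rw [dropWhile_eq_drop_len,
            show 1 + (List.takeWhile pvBlank rest).length - 1
              = (List.takeWhile pvBlank rest).length by omega]
          push_cast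
          ring_nf
        · simp only [aLoop, hb, Bool.false_eq_true, if_false, List.length_cons]
          push_cast
          rw [show i + ((rest.length : Int) + 1) = (i + 1) + (rest.length : Int) by ring,
            ih1 (i + 1) acc]
          simp [bGo, hb]
      · intro i s acc
        by_cases hb : pvBlank l = true
        · -- blank, start stays some s; use L2 on rest
          simp only [aLoop, hb, if_true, List.length_cons]
          push_cast
          rw [show i + ((rest.length : Int) + 1) = (i + 1) + (rest.length : Int) by ring,
            ih2 (i + 1) s acc]
          simp only [List.takeWhile_cons, hb, if_true, List.dropWhile_cons, List.length_cons]
          push_cast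
          ring_nf
        · -- nonblank: flush (s, i-1), back to none; use L1 on rest
          simp only [aLoop, hb, Bool.false_eq_true, if_false, List.length_cons]
          push_cast
          rw [show i + ((rest.length : Int) + 1) = (i + 1) + (rest.length : Int) by ring,
            ih1 (i + 1) (acc ++ [(s, i - 1)])]
          simp [hb, bGo]

-- ===== VERDICT (by name: the statement is the Claim_ definition above) =====
theorem find_blank_blocks_py_spec : Claim_equal_find_blank_blocks_py := by
  intro lines _
  unfold Spec_find_blank_blocks_py find_blank_blocks_py find_blank_blocks_py_alt
  have := (aLoop_invariant lines.length lines rfl).1 0 []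
  simpa using this
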